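-- pv_equiv track=rewrite | github.com/Powerscore/Final-FastLOF | generate_dataset_table.py | get_dataset_domain
-- ===== SOURCE A (Python) =====
-- def get_dataset_domain(dataset_name):
--     """Infer domain from dataset name."""
--     name_lower = dataset_name.lower()
--
--     # Network/Intrusion detection
--     if any(x in name_lower for x in ['http', 'kdd', 'internetads']):
--         return 'Network/Intrusion'
--
--     # Medical/Healthcare
--     if any(x in name_lower for x in ['breast', 'cancer', 'mammography', 'annthyroid']):
--         return 'Medical/Healthcare'
--
--     # Financial
--     if 'creditcard' in name_lower:
--         return 'Financial'
--
--     # Handwriting/Image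
--     if any(x in name_lower for x in ['pen', 'pendigits']):
--         return 'Handwriting/Image'
--
--     # Satellite/Remote Sensing
--     if 'satellite' in name_lower:
--         return 'Satellite/Remote Sensing'
--
--     # Space/Shuttle
--     if 'shuttle' in name_lower:
--         return 'Space/Shuttle'
--
--     # Forest/Cover
--     if 'forest' in name_lower:
--         return 'Forest/Cover'
--
--     # Artificial/Synthetic
--     if any(x in name_lower for x in ['artificial', 'dfki', 'mulcross']):
--         return 'Artificial/Synthetic'
--
--     return 'Other'
-- ===== SOURCE B (Python) =====
-- _LABELS = ['Network/Intrusion', 'Medical/Healthcare', 'Financial', 'Handwriting/Image',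
--            'Satellite/Remote Sensing', 'Space/Shuttle', 'Forest/Cover',
--            'Artificial/Synthetic', 'Other']
--
-- _KEYWORD_RANK = {'http': 0, 'kdd': 0, 'internetads': 0,
--                  'breast': 1, 'cancer': 1, 'mammography': 1, 'annthyroid': 1,
--                  'creditcard': 2,
--                  'pen': 3, 'pendigits': 3,
--                  'satellite': 4,
--                  'shuttle': 5,
--                  'forest': 6,
--                  'artificial': 7, 'dfki': 7, 'mulcross': 7}
--
--
-- def get_dataset_domain(dataset_name):
--     """Infer domain: one scan over the text, keeping the lowest-ranked keyword
--     that starts at any position; rank 8 means no keyword occurs."""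
--     s = dataset_name.lower()
--     best = 8
--     for i in range(len(s)):
--         for kw, rank in _KEYWORD_RANK.items():
--             if rank < best and s.startswith(kw, i):
--                 best = rank
--     return _LABELS[best]
-- ===== Notes on version B (the rewrite author's own statement) =====
-- stated objective: alternative
-- what changed: Instead of testing categories in priority order with substring membership and early return, B makes a single scan over every position of the lowercased name, checks which keyword starts there via a keyword-to-rank map, and keeps the minimum rank found, indexing a label list at the end.
import Mathlib
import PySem

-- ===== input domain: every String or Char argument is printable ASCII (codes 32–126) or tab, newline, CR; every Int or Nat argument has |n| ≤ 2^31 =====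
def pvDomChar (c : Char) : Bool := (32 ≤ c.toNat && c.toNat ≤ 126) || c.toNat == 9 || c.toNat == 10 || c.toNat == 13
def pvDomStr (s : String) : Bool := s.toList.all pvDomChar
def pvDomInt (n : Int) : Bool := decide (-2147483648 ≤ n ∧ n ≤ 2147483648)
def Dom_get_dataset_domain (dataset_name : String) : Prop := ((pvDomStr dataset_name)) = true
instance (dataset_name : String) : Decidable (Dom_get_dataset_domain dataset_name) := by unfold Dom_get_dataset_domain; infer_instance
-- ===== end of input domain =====

-- B replaces A's ordered category tests (substring membership with early return) by a single
-- scan over every position of the lowercased name, keeping the minimum rank of any keyword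
-- starting there (alternative decomposition; same asymptotic cost).

-- ===== PORT A =====
def get_dataset_domain (dataset_name : String) : String :=
  let name_lower := PySem.Str.lower dataset_name
  if ["http", "kdd", "internetads"].any (fun x => PySem.Str.isIn x name_lower) then
    "Network/Intrusion"
  else if ["breast", "cancer", "mammography", "annthyroid"].any (fun x => PySem.Str.isIn x name_lower) then
    "Medical/Healthcare"
  else if PySem.Str.isIn "creditcard" name_lower then
    "Financial"
  else if ["pen", "pendigits"].any (fun x => PySem.Str.isIn x name_lower) then
    "Handwriting/Image"
  else if PySem.Str.isIn "satellite" name_lower then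
    "Satellite/Remote Sensing"
  else if PySem.Str.isIn "shuttle" name_lower then
    "Space/Shuttle"
  else if PySem.Str.isIn "forest" name_lower then
    "Forest/Cover"
  else if ["artificial", "dfki", "mulcross"].any (fun x => PySem.Str.isIn x name_lower) then
    "Artificial/Synthetic"
  else
    "Other"

-- ===== PORT B =====
-- _LABELS and _KEYWORD_RANK from Source B
def pvLabels : List String :=
  ["Network/Intrusion", "Medical/Healthcare", "Financial", "Handwriting/Image",
   "Satellite/Remote Sensing", "Space/Shuttle", "Forest/Cover",
   "Artificial/Synthetic", "Other"]

def pvKeywordRank : List (String × Nat) :=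
  [("http", 0), ("kdd", 0), ("internetads", 0),
   ("breast", 1), ("cancer", 1), ("mammography", 1), ("annthyroid", 1),
   ("creditcard", 2),
   ("pen", 3), ("pendigits", 3),
   ("satellite", 4),
   ("shuttle", 5),
   ("forest", 6),
   ("artificial", 7), ("dfki", 7), ("mulcross", 7)]

-- Source B's two nested for-loops: for each position i, for each (kw, rank), update best.
-- s.startswith(kw, i) is ported exactly as Chars.startswith on (l.drop i).
def pvBestLoop (l : List Char) : Nat :=
  (List.range l.length).foldl
    (fun best i =>
      pvKeywordRank.foldl
        (fun best kv =>
          if kv.2 < best ∧ PySem.Chars.startswith (l.drop i) kv.1.toList = true then kv.2 else best)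
        best)
    8

def get_dataset_domain_alt (dataset_name : String) : String :=
  let l := (PySem.Str.lower dataset_name).toList
  -- best ≤ 8 always, so Python's _LABELS[best] is in range; getD's default is unreachable
  pvLabels.getD (pvBestLoop l) "Other"

-- ===== PRECONDITION & SPEC =====
def Spec_get_dataset_domain (dataset_name : String) (out : String) : Prop := out = get_dataset_domain_alt dataset_name
instance (dataset_name : String) (out : String) : Decidable (Spec_get_dataset_domain dataset_name out) := by unfold Spec_get_dataset_domain; infer_instance

-- ===== CLAIM (what is proved, stated in full; the proofs are below) =====
def Claim_equal_get_dataset_domain : Prop := ∀ (dataset_name : String), Dom_get_dataset_domain dataset_name → Spec_get_dataset_domain dataset_name (get_dataset_domain dataset_name)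

-- ===== LEMMAS AND PROOFS =====

-- keyword kw occurs (as a substring) in l
def pvOcc (l : List Char) (kw : String) : Bool := PySem.Chars.isIn kw.toList l

-- the flattened iteration space of pvBestLoop's two nested loops
def pvFlat (l : List Char) : List (Nat × (String × Nat)) :=
  (List.range l.length).flatMap (fun i => pvKeywordRank.map (fun kv => (i, kv)))

-- nested foldl = foldl over the flattened pair list
theorem nested_flat (l : List Char) (is : List Nat) :
    ∀ b : Nat,
      is.foldl
        (fun best i =>
          pvKeywordRank.foldl
            (fun best kv =>
              if kv.2 < best ∧ PySem.Chars.startswith (l.drop i) kv.1.toList = true then kv.2 else best)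
            best)
        b =
      (is.flatMap (fun i => pvKeywordRank.map (fun kv => (i, kv)))).foldl
        (fun best x =>
          if x.2.2 < best ∧ PySem.Chars.startswith (l.drop x.1) x.2.1.toList = true then x.2.2 else best)
        b := by
  induction is with
  | nil => intro b; rfl
  | cons i is ih =>
      intro b
      simp only [List.foldl_cons, List.flatMap_cons, List.foldl_append, List.foldl_map, ih]

theorem pvBestLoop_eq_flat (l : List Char) :
    pvBestLoop l =
      (pvFlat l).foldl
        (fun best x =>
          if x.2.2 < best ∧ PySem.Chars.startswith (l.drop x.1) x.2.1.toList = true then x.2.2 else best)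
        8 := by
  unfold pvBestLoop pvFlat
  exact nested_flat l (List.range l.length) 8

-- the value of a "keep the smaller passing value" foldl: it is ≤ the seed, ≤ every passing
-- value, and is either the seed or a passing value
theorem foldl_min_spec {α : Type} (f : α → Nat) (g : α → Bool) :
    ∀ (xs : List α) (b : Nat),
      ((xs.foldl (fun b x => if f x < b ∧ g x = true then f x else b) b) = b ∨
        ∃ x ∈ xs, g x = true ∧ f x = xs.foldl (fun b x => if f x < b ∧ g x = true then f x else b) b) ∧
      xs.foldl (fun b x => if f x < b ∧ g x = true then f x else b) b ≤ b ∧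
      ∀ x ∈ xs, g x = true → xs.foldl (fun b x => if f x < b ∧ g x = true then f x else b) b ≤ f x := by
  intro xs
  induction xs with
  | nil => intro b; refine ⟨Or.inl rfl, le_refl _, ?_⟩; intro x hx; simp at hx
  | cons y ys ih =>
      intro b
      simp only [List.foldl_cons]
      by_cases hc : f y < b ∧ g y = true
      · rw [if_pos hc]
        obtain ⟨hd, hle, hmin⟩ := ih (f y)
        refine ⟨?_, le_trans hle (le_of_lt hc.1), ?_⟩
        · rcases hd with h | ⟨x, hx, hg, hf⟩
          · exact Or.inr ⟨y, List.mem_cons_self .., hc.2, h.symm ▸ rfl⟩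
          · exact Or.inr ⟨x, List.mem_cons_of_mem _ hx, hg, hf⟩
        · intro x hx hg
          rcases List.mem_cons.1 hx with rfl | hx'
          · exact hle
          · exact hmin x hx' hg
      · rw [if_neg hc]
        obtain ⟨hd, hle, hmin⟩ := ih b
        refine ⟨?_, hle, ?_⟩
        · rcases hd with h | ⟨x, hx, hg, hf⟩
          · exact Or.inl h
          · exact Or.inr ⟨x, List.mem_cons_of_mem _ hx, hg, hf⟩
        · intro x hx hg
          rcases List.mem_cons.1 hx with rfl | hx'
          · rcases Nat.lt_or_ge (f x) b with h | h
            · exact absurd ⟨h, hg⟩ hc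
            · exact le_trans hle h
          · exact hmin x hx' hg

-- a match found by the scan means the keyword occurs
theorem occ_of_match (l : List Char) (i : Nat) (kw : String)
    (h : PySem.Chars.startswith (l.drop i) kw.toList = true) : pvOcc l kw = true := by
  unfold pvOcc
  exact (PySem.Chars.exists_prefix_drop_iff_isIn _ _).1 ⟨i, (PySem.Chars.startswith_iff _ _).1 h⟩

-- conversely, an occurring (nonempty) keyword yields a scan position inside the range
theorem match_of_occ (l : List Char) (kv : String × Nat) (hmem : kv ∈ pvKeywordRank)
    (hne : kv.1.toList ≠ []) (hocc : pvOcc l kv.1 = true) :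
    ∃ i, (i, kv) ∈ pvFlat l ∧ PySem.Chars.startswith (l.drop i) kv.1.toList = true := by
  obtain ⟨j, hj⟩ := (PySem.Chars.exists_prefix_drop_iff_isIn _ _).2 hocc
  rcases Nat.lt_or_ge j l.length with hlt | hge
  · refine ⟨j, ?_, (PySem.Chars.startswith_iff _ _).2 hj⟩
    unfold pvFlat
    simp only [List.mem_flatMap, List.mem_map, List.mem_range]
    exact ⟨j, hlt, kv, hmem, rfl⟩
  · rw [List.drop_eq_nil_of_le hge] at hj
    exact absurd (List.prefix_nil.1 hj) hne

-- "category j has an occurring keyword"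
def pvCond (l : List Char) (j : Nat) : Bool :=
  (pvKeywordRank.filter (fun kv => kv.2 == j)).any (fun kv => pvOcc l kv.1)

theorem pvKeywordRank_ne : ∀ kv ∈ pvKeywordRank, kv.1.toList ≠ [] := by decide

theorem mem_table_of_mem_flat (l : List Char) (x : Nat × (String × Nat)) (hx : x ∈ pvFlat l) :
    x.2 ∈ pvKeywordRank := by
  unfold pvFlat at hx
  simp only [List.mem_flatMap, List.mem_map, List.mem_range] at hx
  obtain ⟨i, _, kv, hkv, he⟩ := hx
  cases he; exact hkv

theorem cond_of_match (l : List Char) (i : Nat) (kv : String × Nat)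
    (hmem : kv ∈ pvKeywordRank) (hg : PySem.Chars.startswith (l.drop i) kv.1.toList = true) :
    pvCond l kv.2 = true := by
  unfold pvCond
  rw [List.any_eq_true]
  exact ⟨kv, List.mem_filter.2 ⟨hmem, by simp⟩, occ_of_match l i kv.1 hg⟩

theorem exists_of_cond (l : List Char) (j : Nat) (h : pvCond l j = true) :
    ∃ kv ∈ pvKeywordRank, kv.2 = j ∧ pvOcc l kv.1 = true := by
  unfold pvCond at h
  rw [List.any_eq_true] at h
  obtain ⟨kv, hm, ho⟩ := h
  have hmf := List.mem_filter.1 hm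
  exact ⟨kv, hmf.1, by simpa using hmf.2, ho⟩

-- the scan's minimum rank equals the rank of the first category with an occurring keyword
set_option maxHeartbeats 1000000 in
theorem pvBestLoop_chain_cond (l : List Char) :
    pvBestLoop l =
      if pvCond l 0 = true then 0 else if pvCond l 1 = true then 1 else if pvCond l 2 = true then 2
      else if pvCond l 3 = true then 3 else if pvCond l 4 = true then 4 else if pvCond l 5 = true then 5
      else if pvCond l 6 = true then 6 else if pvCond l 7 = true then 7 else 8 := by
  rw [pvBestLoop_eq_flat]
  obtain ⟨hd, hle, hmin⟩ :=
    foldl_min_spec (fun x : Nat × (String × Nat) => x.2.2)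
      (fun x => PySem.Chars.startswith (l.drop x.1) x.2.1.toList) (pvFlat l) 8
  have hfle : ∀ j : Nat, pvCond l j = true →
      (pvFlat l).foldl
        (fun best x =>
          if x.2.2 < best ∧ PySem.Chars.startswith (l.drop x.1) x.2.1.toList = true then x.2.2 else best)
        8 ≤ j := by
    intro j hj
    obtain ⟨kv, hmem, hrank, hocc⟩ := exists_of_cond l j hj
    obtain ⟨i, hm, hg⟩ := match_of_occ l kv hmem (pvKeywordRank_ne kv hmem) hocc
    exact hrank ▸ hmin _ hm hg
  apply le_antisymm
  · split_ifs with h0 h1 h2 h3 h4 h5 h6 h7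
    exacts [hfle 0 h0, hfle 1 h1, hfle 2 h2, hfle 3 h3, hfle 4 h4, hfle 5 h5, hfle 6 h6,
      hfle 7 h7, hle]
  · rcases hd with h8 | ⟨x, hx, hg, hf⟩
    · rw [h8]; split_ifs <;> omega
    · rw [← hf]
      have hcond : pvCond l x.2.2 = true := cond_of_match l x.1 x.2 (mem_table_of_mem_flat l x hx) hg
      obtain ⟨v, hv⟩ : ∃ v, x.2.2 = v := ⟨_, rfl⟩
      rw [hv] at hcond ⊢
      split_ifs with h0 h1 h2 h3 h4 h5 h6 h7
      · exact Nat.zero_le _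
      · rcases Nat.lt_or_ge v 1 with hlt | hge
        · interval_cases v
          · exact absurd hcond h0
        · exact hge
      · rcases Nat.lt_or_ge v 2 with hlt | hge
        · interval_cases v
          · exact absurd hcond h0
          · exact absurd hcond h1
        · exact hge
      · rcases Nat.lt_or_ge v 3 with hlt | hge
        · interval_cases v
          · exact absurd hcond h0
          · exact absurd hcond h1
          · exact absurd hcond h2
        · exact hge
      · rcases Nat.lt_or_ge v 4 with hlt | hge
        · interval_cases v
          · exact absurd hcond h0
          · exact absurd hcond h1
          · exact absurd hcond h2
          · exact absurd hcond h3
        · exact hge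
      · rcases Nat.lt_or_ge v 5 with hlt | hge
        · interval_cases v
          · exact absurd hcond h0
          · exact absurd hcond h1
          · exact absurd hcond h2
          · exact absurd hcond h3
          · exact absurd hcond h4
        · exact hge
      · rcases Nat.lt_or_ge v 6 with hlt | hge
        · interval_cases v
          · exact absurd hcond h0
          · exact absurd hcond h1
          · exact absurd hcond h2
          · exact absurd hcond h3
          · exact absurd hcond h4
          · exact absurd hcond h5
        · exact hge
      · rcases Nat.lt_or_ge v 7 with hlt | hge
        · interval_cases v
          · exact absurd hcond h0
          · exact absurd hcond h1
          · exact absurd hcond h2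
          · exact absurd hcond h3
          · exact absurd hcond h4
          · exact absurd hcond h5
          · exact absurd hcond h6
        · exact hge
      · rcases Nat.lt_or_ge v 8 with hlt | hge
        · interval_cases v
          · exact absurd hcond h0
          · exact absurd hcond h1
          · exact absurd hcond h2
          · exact absurd hcond h3
          · exact absurd hcond h4
          · exact absurd hcond h5
          · exact absurd hcond h6
          · exact absurd hcond h7
        · exact hge

-- the chain with the category conditions written out keyword by keyword
theorem pvBestLoop_chain (l : List Char) :
    pvBestLoop l =
      if pvOcc l "http" = true ∨ pvOcc l "kdd" = true ∨ pvOcc l "internetads" = true then 0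
      else if pvOcc l "breast" = true ∨ pvOcc l "cancer" = true ∨ pvOcc l "mammography" = true ∨ pvOcc l "annthyroid" = true then 1
      else if pvOcc l "creditcard" = true then 2
      else if pvOcc l "pen" = true ∨ pvOcc l "pendigits" = true then 3
      else if pvOcc l "satellite" = true then 4
      else if pvOcc l "shuttle" = true then 5
      else if pvOcc l "forest" = true then 6
      else if pvOcc l "artificial" = true ∨ pvOcc l "dfki" = true ∨ pvOcc l "mulcross" = true then 7
      else 8 := by
  rw [pvBestLoop_chain_cond]
  have h0 : pvCond l 0 = true ↔ (pvOcc l "http" = true ∨ pvOcc l "kdd" = true ∨ pvOcc l "internetads" = true) := by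
    simp [pvCond, pvKeywordRank]
  have h1 : pvCond l 1 = true ↔ (pvOcc l "breast" = true ∨ pvOcc l "cancer" = true ∨ pvOcc l "mammography" = true ∨ pvOcc l "annthyroid" = true) := by
    simp [pvCond, pvKeywordRank]
  have h2 : pvCond l 2 = true ↔ pvOcc l "creditcard" = true := by
    simp [pvCond, pvKeywordRank]
  have h3 : pvCond l 3 = true ↔ (pvOcc l "pen" = true ∨ pvOcc l "pendigits" = true) := by
    simp [pvCond, pvKeywordRank]
  have h4 : pvCond l 4 = true ↔ pvOcc l "satellite" = true := by
    simp [pvCond, pvKeywordRank]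
  have h5 : pvCond l 5 = true ↔ pvOcc l "shuttle" = true := by
    simp [pvCond, pvKeywordRank]
  have h6 : pvCond l 6 = true ↔ pvOcc l "forest" = true := by
    simp [pvCond, pvKeywordRank]
  have h7 : pvCond l 7 = true ↔ (pvOcc l "artificial" = true ∨ pvOcc l "dfki" = true ∨ pvOcc l "mulcross" = true) := by
    simp [pvCond, pvKeywordRank]
  simp only [h0, h1, h2, h3, h4, h5, h6, h7]

-- ===== VERDICT (by name: the statement is the Claim_ definition above) =====
theorem get_dataset_domain_spec : Claim_equal_get_dataset_domain := by
  intro s _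
  unfold Spec_get_dataset_domain
  show get_dataset_domain s = pvLabels.getD (pvBestLoop (PySem.Str.lower s).toList) "Other"
  rw [pvBestLoop_chain]
  simp only [get_dataset_domain, List.any_cons, List.any_nil, Bool.or_false, Bool.or_eq_true,
    pvOcc, PySem.Str.isIn_eq, PySem.Str.toList_lower]
  split_ifs <;> simp_all [pvLabels]
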